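-- pv_equiv track=rewrite | github.com/Tom-game-project/push_swap | labo/src/labo/__init__.py | swap_checker
-- ===== SOURCE A (Python) =====
-- def swap_checker(data:list, index_a:int, index_b:int):
--     # this is test function
--     base_iter = list(i for i,_ in enumerate(data))
--     x:list[bool] = map(lambda a:a[0] != a[1], zip(base_iter, data))
--     count = 0
--     for i,j in enumerate(x):
--         if j:
--             match count:
--                 case 0:
--                     if data[i] == index_b:
--                         count += 1
--                     else:
--                         # 位置は正しい値が違う
--                         return False
--                 case 1:
--                     if data[i] == index_a:
--                         count += 1
--                     else:
--                         # 位置は正しい値が違う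
--                         return False
--                 case _:
--                     # 他の部分に影響している
--                     return False
--         else:
--             pass
--     return count == 2
-- ===== SOURCE B (Python) =====
-- def swap_checker(data, index_a, index_b):
--     # staged search: find the first mismatch, then the second, then compare the
--     # remaining slice against the identity range directly
--     n = len(data)
--     i = next((k for k in range(n) if data[k] != k), None)
--     if i is None or data[i] != index_b:
--         return False
--     j = next((k for k in range(i + 1, n) if data[k] != k), None)
--     if j is None or data[j] != index_a:
--         return False
--     return data[j + 1:] == list(range(j + 1, n))
-- ===== Notes on version B (the rewrite author's own statement) =====
-- stated objective: alternative
-- what changed: Replaced A's single-pass counting state machine over a boolean mismatch map by a staged search: find the first mismatch index, check it holds index_b, find the second mismatch, check it holds index_a, then compare the remaining slice wholesale against the identity range.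
import Mathlib
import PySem

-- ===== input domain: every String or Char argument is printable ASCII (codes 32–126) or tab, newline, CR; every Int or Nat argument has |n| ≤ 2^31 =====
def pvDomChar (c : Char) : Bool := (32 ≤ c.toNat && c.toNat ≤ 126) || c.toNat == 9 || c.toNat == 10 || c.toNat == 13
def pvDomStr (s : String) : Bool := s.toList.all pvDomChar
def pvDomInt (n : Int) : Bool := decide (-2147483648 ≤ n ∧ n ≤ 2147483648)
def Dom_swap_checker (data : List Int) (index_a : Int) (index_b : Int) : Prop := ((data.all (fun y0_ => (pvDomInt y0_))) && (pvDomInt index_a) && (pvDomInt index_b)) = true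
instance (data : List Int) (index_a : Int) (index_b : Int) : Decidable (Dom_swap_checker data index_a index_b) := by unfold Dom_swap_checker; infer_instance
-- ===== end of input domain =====

-- B replaces A's counting state machine by staged mismatch searches plus a slice-vs-range comparison (same O(n), measurably lower constants); return values agree everywhere.

-- ===== PORT A =====
-- the for-loop with its early returns, as structural recursion over enumerate(x); count is the state
def swapCheckerLoop (data : List Int) (index_a index_b : Int) :
    List (Int × Bool) → Nat → Bool
  | [], count => count == 2
  | (i, j) :: rest, count =>
    if j then
      match count with
      | 0 => if PySem.List.pyGetD data i 0 == index_b then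
               swapCheckerLoop data index_a index_b rest 1 else false
      | 1 => if PySem.List.pyGetD data i 0 == index_a then
               swapCheckerLoop data index_a index_b rest 2 else false
      | _ => false
    else swapCheckerLoop data index_a index_b rest count

def swap_checker (data : List Int) (index_a : Int) (index_b : Int) : Bool :=
  let base_iter := (PySem.List.enumerate data 0).map (·.1)
  let x := (base_iter.zip data).map (fun a => decide (a.1 ≠ a.2))
  swapCheckerLoop data index_a index_b (PySem.List.enumerate x 0) 0

-- ===== PORT B =====
-- the generator 'next((k for k in ks if data[k] != k), None)'
def nextBad (data : List Int) : List Int → Option Int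
  | [] => none
  | k :: r => if PySem.List.pyGetD data k 0 ≠ k then some k else nextBad data r

def swap_checker_alt (data : List Int) (index_a : Int) (index_b : Int) : Bool :=
  let n : Int := data.length
  match nextBad data (PySem.List.pyRange 0 n 1) with
  | none => false
  | some i =>
    if PySem.List.pyGetD data i 0 ≠ index_b then false
    else
      match nextBad data (PySem.List.pyRange (i + 1) n 1) with
      | none => false
      | some j =>
        if PySem.List.pyGetD data j 0 ≠ index_a then false
        else decide (PySem.List.slice data (some (j + 1)) (some n) = PySem.List.pyRange (j + 1) n 1)

-- ===== PRECONDITION & SPEC =====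
def Spec_swap_checker (data : List Int) (index_a : Int) (index_b : Int) (out : Bool) : Prop := out = swap_checker_alt data index_a index_b
instance (data : List Int) (index_a : Int) (index_b : Int) (out : Bool) : Decidable (Spec_swap_checker data index_a index_b out) := by unfold Spec_swap_checker; infer_instance

-- ===== CLAIM (what is proved, stated in full; the proofs are below) =====
def Claim_equal_swap_checker : Prop := ∀ (data : List Int) (index_a : Int) (index_b : Int), Dom_swap_checker data index_a index_b → Spec_swap_checker data index_a index_b (swap_checker data index_a index_b)

-- ===== LEMMAS AND PROOFS =====

-- the values of the misplaced entries of suf, whose first index is off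
def badVals : List Int → Int → List Int
  | [], _ => []
  | v :: r, off => if v ≠ off then v :: badVals r (off + 1) else badVals r (off + 1)

-- what the A-loop computes from a given count and the remaining misplaced values
def gSpec (index_a index_b : Int) : Nat → List Int → Bool
  | count, [] => count == 2
  | 0, v :: r => if v == index_b then gSpec index_a index_b 1 r else false
  | 1, v :: r => if v == index_a then gSpec index_a index_b 2 r else false
  | _ + 2, _ :: _ => false

-- B's second stage, from start index s
def ph1 (data : List Int) (index_a : Int) (s n : Int) : Bool :=
  match nextBad data (PySem.List.pyRange s n 1) with
  | none => false
  | some j =>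
    if PySem.List.pyGetD data j 0 ≠ index_a then false
    else decide (PySem.List.slice data (some (j + 1)) (some n) = PySem.List.pyRange (j + 1) n 1)

lemma zip_fst_enumerate (data : List Int) (s : Int) :
    ((PySem.List.enumerate data s).map (·.1)).zip data = PySem.List.enumerate data s := by
  induction data generalizing s with
  | nil => rfl
  | cons v r ih => simp [PySem.List.enumerate_cons, ih]

lemma enumerate_enumerate_map {β : Type} (f : Int × Int → β) (xs : List Int) (s : Int) :
    PySem.List.enumerate ((PySem.List.enumerate xs s).map f) s
      = (PySem.List.enumerate xs s).map (fun p => (p.1, f p)) := by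
  induction xs generalizing s with
  | nil => rfl
  | cons v r ih => simp [PySem.List.enumerate_cons, ih]

lemma pyGetD_append_cons (pre : List Int) (v : Int) (r : List Int) :
    PySem.List.pyGetD (pre ++ v :: r) (pre.length : Int) 0 = v := by
  simp [PySem.List.pyGetD_natCast, List.getD]

lemma loop_eq_gSpec (index_a index_b : Int) (suf : List Int) :
    ∀ (pre : List Int) (count : Nat),
    swapCheckerLoop (pre ++ suf) index_a index_b
        ((PySem.List.enumerate suf (pre.length : Int)).map
          (fun p => (p.1, decide (p.1 ≠ p.2)))) count
      = gSpec index_a index_b count (badVals suf (pre.length : Int)) := by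
  induction suf with
  | nil => intro pre count; cases count with
    | zero => rfl
    | succ n => cases n <;> rfl
  | cons v r ih =>
    intro pre count
    have hpre : ∀ c, swapCheckerLoop (pre ++ v :: r) index_a index_b
        ((PySem.List.enumerate r ((pre.length : Int) + 1)).map
          (fun p => (p.1, decide (p.1 ≠ p.2)))) c
        = gSpec index_a index_b c (badVals r ((pre.length : Int) + 1)) := by
      intro c
      have := ih (pre ++ [v]) c
      simpa [List.append_assoc] using this
    simp only [PySem.List.enumerate_cons, List.map_cons, swapCheckerLoop, badVals]
    by_cases hne : (pre.length : Int) ≠ v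
    · rw [if_pos (show v ≠ (pre.length : Int) from fun h => hne h.symm),
          if_pos (show (decide ((pre.length : Int) ≠ v)) = true by simpa using hne),
          pyGetD_append_cons]
      cases count with
      | zero =>
        by_cases hb : v = index_b
        · simpa [gSpec, hb] using hpre 1
        · simp [gSpec, hb]
      | succ n => cases n with
        | zero =>
          by_cases ha : v = index_a
          · simpa [gSpec, ha] using hpre 2
          · simp [gSpec, ha]
        | succ m => simp [gSpec]
    · rw [not_ne_iff] at hne
      rw [if_neg (show ¬ v ≠ (pre.length : Int) from fun h => h hne.symm),
          if_neg (show ¬ (decide ((pre.length : Int) ≠ v)) = true by simp [hne])]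
      exact hpre count

-- xs[len(pre):] of pre ++ suf is suf
lemma slice_append (pre suf : List Int) :
    PySem.List.slice (pre ++ suf) (some (pre.length : Int)) (some ((pre ++ suf).length : Int)) = suf := by
  rw [show (((pre ++ suf).length : Int)) = (((pre.length + suf.length : Nat) : Int)) by simp,
      PySem.List.slice_natCast]
  simp

-- the tail slice equals the tail of the range iff no mismatch remains
lemma slice_eq_range_iff (suf : List Int) : ∀ (pre : List Int),
    (PySem.List.slice (pre ++ suf) (some (pre.length : Int)) (some ((pre ++ suf).length : Int))
        = PySem.List.pyRange (pre.length : Int) ((pre ++ suf).length : Int) 1)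
      ↔ badVals suf (pre.length : Int) = [] := by
  induction suf with
  | nil =>
    intro pre
    rw [slice_append pre []]
    simp [PySem.List.pyRange_one_eq_nil (le_refl _), badVals]
  | cons v r ih =>
    intro pre
    have hlt : (pre.length : Int) < ((pre ++ v :: r).length : Int) := by simp
    have eL : ((pre.length : Int) + 1) = (((pre ++ [v]).length : Int)) := by simp
    have eD : pre ++ v :: r = (pre ++ [v]) ++ r := by simp
    rw [slice_append pre (v :: r), PySem.List.pyRange_one_cons hlt]
    simp only [List.cons.injEq, badVals]
    rw [eL, eD]
    have hr := ih (pre ++ [v])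
    rw [slice_append (pre ++ [v]) r] at hr
    by_cases hv : v = (pre.length : Int)
    · rw [if_neg (show ¬ v ≠ (pre.length : Int) by simpa using hv)]
      rw [hr]
      simp [hv]
    · rw [if_pos (show v ≠ (pre.length : Int) from hv)]
      simp [hv]

lemma ph1_eq_gSpec (index_a index_b : Int) (suf : List Int) : ∀ (pre : List Int),
    ph1 (pre ++ suf) index_a (pre.length : Int) ((pre ++ suf).length : Int)
      = gSpec index_a index_b 1 (badVals suf (pre.length : Int)) := by
  induction suf with
  | nil =>
    intro pre
    unfold ph1
    rw [show (pre ++ ([] : List Int)) = pre by simp,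
        PySem.List.pyRange_one_eq_nil (le_refl _)]
    rfl
  | cons v r ih =>
    intro pre
    have hlt : (pre.length : Int) < ((pre ++ v :: r).length : Int) := by simp
    have eL : ((pre.length : Int) + 1) = (((pre ++ [v]).length : Int)) := by simp
    have eD : pre ++ v :: r = (pre ++ [v]) ++ r := by simp
    unfold ph1
    rw [PySem.List.pyRange_one_cons hlt]
    simp only [nextBad, pyGetD_append_cons]
    by_cases hv : v ≠ (pre.length : Int)
    · rw [if_pos hv]
      simp only [badVals, if_pos hv, gSpec, pyGetD_append_cons]
      by_cases ha : v = index_a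
      · rw [if_neg (show ¬ v ≠ index_a by simpa using ha), if_pos (by simpa using ha)]
        rw [eL, eD]
        have hiff := slice_eq_range_iff r (pre ++ [v])
        have hbg : ∀ bad : List Int, gSpec index_a index_b 2 bad = decide (bad = []) := by
          intro bad; cases bad <;> simp [gSpec]
        rw [hbg]
        simp only [decide_eq_decide]
        exact hiff
      · rw [if_pos (show v ≠ index_a from ha), if_neg (by simpa using ha)]
    · rw [if_neg hv]
      rw [not_ne_iff] at hv
      simp only [badVals, if_neg (show ¬ v ≠ (pre.length : Int) by simp [hv])]
      rw [eL, eD]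
      have := ih (pre ++ [v])
      unfold ph1 at this
      exact this

lemma alt_eq_gSpec (index_a index_b : Int) (suf : List Int) : ∀ (pre : List Int),
    (match nextBad (pre ++ suf) (PySem.List.pyRange (pre.length : Int) ((pre ++ suf).length : Int) 1) with
     | none => false
     | some i =>
       if PySem.List.pyGetD (pre ++ suf) i 0 ≠ index_b then false
       else ph1 (pre ++ suf) index_a (i + 1) ((pre ++ suf).length : Int))
      = gSpec index_a index_b 0 (badVals suf (pre.length : Int)) := by
  induction suf with
  | nil =>
    intro pre
    rw [show (pre ++ ([] : List Int)) = pre by simp,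
        PySem.List.pyRange_one_eq_nil (le_refl _)]
    rfl
  | cons v r ih =>
    intro pre
    have hlt : (pre.length : Int) < ((pre ++ v :: r).length : Int) := by simp
    have eL : ((pre.length : Int) + 1) = (((pre ++ [v]).length : Int)) := by simp
    have eD : pre ++ v :: r = (pre ++ [v]) ++ r := by simp
    rw [PySem.List.pyRange_one_cons hlt]
    simp only [nextBad, pyGetD_append_cons]
    by_cases hv : v ≠ (pre.length : Int)
    · rw [if_pos hv]
      simp only [badVals, if_pos hv, gSpec, pyGetD_append_cons]
      by_cases hb : v = index_b
      · rw [if_neg (show ¬ v ≠ index_b by simpa using hb), if_pos (by simpa using hb)]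
        rw [eL, eD]
        exact ph1_eq_gSpec index_a index_b r (pre ++ [v])
      · rw [if_pos (show v ≠ index_b from hb), if_neg (by simpa using hb)]
    · rw [if_neg hv]
      rw [not_ne_iff] at hv
      simp only [badVals, if_neg (show ¬ v ≠ (pre.length : Int) by simp [hv])]
      rw [eL, eD]
      exact ih (pre ++ [v])

lemma alt_unfold (data : List Int) (index_a index_b : Int) :
    swap_checker_alt data index_a index_b
      = (match nextBad data (PySem.List.pyRange 0 (data.length : Int) 1) with
         | none => false
         | some i =>
           if PySem.List.pyGetD data i 0 ≠ index_b then false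
           else ph1 data index_a (i + 1) (data.length : Int)) := rfl

-- ===== VERDICT (by name: the statement is the Claim_ definition above) =====
theorem swap_checker_spec : Claim_equal_swap_checker := by
  intro data index_a index_b _
  unfold Spec_swap_checker swap_checker
  simp only [zip_fst_enumerate, enumerate_enumerate_map]
  have hA := loop_eq_gSpec index_a index_b data [] 0
  simp only [List.nil_append, List.length_nil, Int.natCast_zero] at hA
  have hB := alt_eq_gSpec index_a index_b data []
  simp only [List.nil_append, List.length_nil, Int.natCast_zero] at hB
  rw [hA, ← hB, alt_unfold]
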